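-- pv_equiv track=rewrite | github.com/sepkeuchenius/ypool | functions/main.py | _remove_passive_players
-- ===== SOURCE A (Python) =====
-- from typing import List
--
-- START_ELO = 1500
--
-- def _remove_passive_players(rating_history: List[dict]):
--     passive_players = list(rating_history[-1].keys())
--     for rating in rating_history:
--         for player in rating:
--             if player in passive_players and rating[player] != START_ELO:
--                 passive_players.remove(player)  # this player is not passive
--     for rating in rating_history:
--         for player in passive_players:
--             del rating[player]
--     return rating_history
-- ===== SOURCE B (Python) =====
-- from typing import List
--
-- START_ELO = 1500
--
-- # Return-value equivalence only: A deletes keys from the input dicts in place;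
-- # B builds fresh dicts and leaves the input untouched.
-- def _remove_passive_players(rating_history: List[dict]):
--     # invert the history into a per-player index of all ELO values seen
--     seen = {}
--     for rating in rating_history:
--         for player, elo in rating.items():
--             seen.setdefault(player, set()).add(elo)
--     passive = {p for p in rating_history[-1] if seen[p] == {START_ELO}}
--     return [{p: e for p, e in rating.items() if p not in passive}
--             for rating in rating_history]
-- ===== Notes on version B (the rewrite author's own statement) =====
-- stated objective: simpler
-- what changed: A maintains a mutable passive-candidate list pruned inside two nested passes (list membership test and O(p) list.remove per player) and then deletes from every dict in place; B builds an inverted index player->set of all ELO values seen in one pass, judges each key of the last dict by a single index lookup (seen[p] == {START_ELO}), and rebuilds the dicts filtering the passive players.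
import Mathlib
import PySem

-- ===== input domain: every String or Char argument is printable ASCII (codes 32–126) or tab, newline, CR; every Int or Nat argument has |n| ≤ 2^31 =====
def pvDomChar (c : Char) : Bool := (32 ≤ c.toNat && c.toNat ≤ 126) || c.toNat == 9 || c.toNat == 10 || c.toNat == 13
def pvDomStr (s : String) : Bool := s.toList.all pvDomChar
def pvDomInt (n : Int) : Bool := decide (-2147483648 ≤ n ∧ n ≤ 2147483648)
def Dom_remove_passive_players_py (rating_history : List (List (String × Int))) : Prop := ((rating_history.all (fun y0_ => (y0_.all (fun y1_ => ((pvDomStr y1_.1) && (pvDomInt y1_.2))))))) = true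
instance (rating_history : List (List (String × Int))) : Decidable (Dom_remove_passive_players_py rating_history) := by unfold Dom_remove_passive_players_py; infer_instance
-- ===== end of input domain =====

-- B replaces A's prune-a-candidate-list bookkeeping by an inverted index (player → set of
-- all ELO values seen), judged per player in one lookup (simpler decomposition; A mutates
-- the input dicts in place, B builds fresh dicts — return values agree).

-- ===== PORT A =====
-- dicts are association lists with unique keys; iteration over a dict = its key list,
-- rating[player] = first-match lookup (exact on unique-key dicts), del = drop the key.
def remove_passive_players_py (rating_history : List (List (String × Int))) : List (List (String × Int)) :=
  -- passive_players = list(rating_history[-1].keys());  IndexError (h = []) excluded by Pre_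
  let passive0 := ((PySem.List.pyGet? rating_history (-1)).getD []).map Prod.fst
  -- for rating in rating_history: for player in rating: if player in passive_players and rating[player] != START_ELO: passive_players.remove(player)
  -- (player ranges over rating's keys, so the lookup never misses; list.remove is guarded by the membership test, so ValueError cannot occur)
  let passive := rating_history.foldl (fun pp rating =>
      (rating.map Prod.fst).foldl (fun pp player =>
        if pp.contains player && (List.lookup player rating != some (1500 : Int))
        then (PySem.List.remove? pp player).getD pp else pp) pp) passive0
  -- for rating in rating_history: for player in passive_players: del rating[player]
  -- (KeyError — a passive player absent from some dict — excluded by Pre_)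
  rating_history.map (fun rating =>
    passive.foldl (fun r player => r.filter (fun kv => kv.1 != player)) rating)

-- ===== PORT B =====
def remove_passive_players_py_alt (rating_history : List (List (String × Int))) : List (List (String × Int)) :=
  -- seen = {}; for rating: for player, elo in rating.items(): seen.setdefault(player, set()).add(elo)
  let seen : PySem.Dict String (PySem.Set Int) := rating_history.foldl
    (fun d rating => rating.foldl
      (fun d kv => d.modify kv.1 [] (fun s => PySem.Set.add s kv.2)) d) PySem.Dict.empty
  -- passive = {p for p in rating_history[-1] if seen[p] == {START_ELO}}
  -- (p is a key of the last dict, so seen[p] exists: the getD default is never taken)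
  let passive : PySem.Set String := PySem.Set.ofList
    ((((PySem.List.pyGet? rating_history (-1)).getD []).map Prod.fst).filter
      (fun p => PySem.Set.equal (seen.getD p []) (PySem.Set.ofList [(1500 : Int)])))
  -- [{p: e for p, e in rating.items() if p not in passive} for rating in rating_history]
  rating_history.map (fun rating => rating.filter (fun kv => !(passive.contains kv.1)))

-- ===== PRECONDITION & SPEC =====
-- Pre_ excludes exactly the inputs where A raises: the empty history (IndexError on
-- rating_history[-1]) and histories where some player of the last dict that is never
-- seen with a non-default ELO is missing from some dict (KeyError on del); the
-- unique-keys clause only states what every Python dict satisfies anyway.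
def Pre_remove_passive_players_py (rating_history : List (List (String × Int))) : Prop :=
  rating_history ≠ [] ∧
  (∀ r ∈ rating_history, (r.map Prod.fst).Nodup) ∧
  (∀ p ∈ ((rating_history.getLast?).getD []).map Prod.fst,
    (∀ r ∈ rating_history, ∀ kv ∈ r, kv.1 = p → kv.2 = (1500 : Int)) →
    ∀ r ∈ rating_history, p ∈ r.map Prod.fst)
instance (rating_history : List (List (String × Int))) : Decidable (Pre_remove_passive_players_py rating_history) := by unfold Pre_remove_passive_players_py; infer_instance

def pvWitness_remove_passive_players_py : (List (List (String × Int))) :=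
  [[("a", 1500), ("b", 1600)], [("a", 1500), ("b", 1500)]]

def Spec_remove_passive_players_py (rating_history : List (List (String × Int))) (out : List (List (String × Int))) : Prop := out = remove_passive_players_py_alt rating_history
instance (rating_history : List (List (String × Int))) (out : List (List (String × Int))) : Decidable (Spec_remove_passive_players_py rating_history out) := by unfold Spec_remove_passive_players_py; infer_instance

-- ===== CLAIM (what is proved, stated in full; the proofs are below) =====
def Claim_equal_remove_passive_players_py : Prop := ∀ (rating_history : List (List (String × Int))), Dom_remove_passive_players_py rating_history → Pre_remove_passive_players_py rating_history → Spec_remove_passive_players_py rating_history (remove_passive_players_py rating_history)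

-- ===== LEMMAS AND PROOFS =====

-- A's phase-1 test for one rating dict: player is a key and its value is not 1500
def pvAct1 (rating : List (String × Int)) (q : String) : Bool :=
  (rating.map Prod.fst).contains q && (List.lookup q rating != some (1500 : Int))

theorem pv_inner_fold (rating : List (String × Int)) (ks : List String) (pp : List String)
    (hnd : pp.Nodup) :
    ks.foldl (fun pp player =>
        if pp.contains player && (List.lookup player rating != some (1500 : Int))
        then (PySem.List.remove? pp player).getD pp else pp) pp
      = pp.filter (fun q => !(ks.contains q && (List.lookup q rating != some (1500 : Int)))) := by
  induction ks generalizing pp with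
  | nil => simp
  | cons k ks ih =>
    rw [List.foldl_cons]
    have hstep : (if pp.contains k && (List.lookup k rating != some (1500 : Int))
        then (PySem.List.remove? pp k).getD pp else pp)
        = pp.filter (fun q => !(q == k && (List.lookup q rating != some (1500 : Int)))) := by
      cases hc : (List.lookup k rating != some (1500 : Int)) with
      | false =>
        have hall : ∀ q ∈ pp, (!(q == k && (List.lookup q rating != some (1500 : Int)))) = true := by
          intro q hq
          by_cases hqk : q = k
          · subst hqk; simp [hc]
          · simp [beq_eq_false_iff_ne.mpr hqk]
        rw [if_neg (by simp [hc]), List.filter_eq_self.mpr hall]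
      | true =>
        by_cases hm : k ∈ pp
        · rw [PySem.List.remove?_eq_some_erase pp k hm]
          have hck : pp.contains k = true := by simpa using hm
          rw [if_pos (by simp [hck, hc, hm]), Option.getD_some]
          rw [List.Nodup.erase_eq_filter hnd]
          apply List.filter_congr
          intro q hq
          by_cases hqk : q = k
          · subst hqk; simp [hc]
          · simp [beq_eq_false_iff_ne.mpr hqk, bne, hqk]
        · have hck : pp.contains k = false := by simpa using hm
          have hall : ∀ q ∈ pp, (!(q == k && (List.lookup q rating != some (1500 : Int)))) = true := by
            intro q hq
            have hqk : ¬ q = k := fun e => hm (e ▸ hq)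
            simp [beq_eq_false_iff_ne.mpr hqk]
          rw [if_neg (by simp [hck, hm]), List.filter_eq_self.mpr hall]
    rw [hstep, ih _ (hnd.filter _), List.filter_filter]
    apply List.filter_congr
    intro q hq
    clear hstep ih
    by_cases hqk : q = k <;> by_cases hmk : q ∈ ks <;>
      cases h1 : (List.lookup q rating != some (1500 : Int)) <;>
        simp [List.contains_cons, hqk, hmk, h1]

theorem pv_outer_fold (h : List (List (String × Int))) (pp : List String) (hnd : pp.Nodup) :
    h.foldl (fun pp rating =>
        (rating.map Prod.fst).foldl (fun pp player =>
          if pp.contains player && (List.lookup player rating != some (1500 : Int))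
          then (PySem.List.remove? pp player).getD pp else pp) pp) pp
      = pp.filter (fun q => !(h.any (fun r => pvAct1 r q))) := by
  induction h generalizing pp with
  | nil => simp
  | cons r h ih =>
    rw [List.foldl_cons, pv_inner_fold r _ pp hnd, ih _ (hnd.filter _), List.filter_filter]
    apply List.filter_congr
    intro q hq
    have e1 : ((r.map Prod.fst).contains q && (List.lookup q r != some (1500 : Int)))
        = pvAct1 r q := rfl
    rw [e1, List.any_cons]
    cases hx : pvAct1 r q <;> cases hy : h.any (fun r => pvAct1 r q) <;> simp [hx, hy]

theorem pv_del_fold (ps : List String) (rating : List (String × Int)) :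
    ps.foldl (fun r player => r.filter (fun kv => kv.1 != player)) rating
      = rating.filter (fun kv => !(ps.contains kv.1)) := by
  induction ps generalizing rating with
  | nil => simp
  | cons p ps ih =>
    rw [List.foldl_cons, ih, List.filter_filter]
    apply List.filter_congr
    intro kv _
    by_cases hp : kv.1 = p <;> by_cases hm : kv.1 ∈ ps <;>
      simp [List.contains_cons, hp, hm, bne]

theorem pv_act1_iff (r : List (String × Int)) (hnd : (r.map Prod.fst).Nodup) (q : String) :
    pvAct1 r q = true ↔ ∃ kv ∈ r, kv.2 ≠ (1500 : Int) ∧ kv.1 = q := by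
  induction r with
  | nil => simp [pvAct1]
  | cons kv r ih =>
    rw [List.map_cons, List.nodup_cons] at hnd
    obtain ⟨hk, hnd'⟩ := hnd
    by_cases hq : kv.1 = q
    · subst hq
      have hlk : List.lookup kv.1 ((kv.1, kv.2) :: r) = some kv.2 := by simp [List.lookup]
      constructor
      · intro ha
        unfold pvAct1 at ha
        rw [hlk] at ha
        exact ⟨kv, List.mem_cons_self, by simpa using ((Bool.and_eq_true .. ).mp ha).2, rfl⟩
      · rintro ⟨kv', hkv', hne, hq'⟩
        unfold pvAct1
        rw [hlk]
        have hvv : kv'.2 = kv.2 := by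
          rcases List.mem_cons.mp hkv' with h' | h'
          · rw [h']
          · exact absurd (hq' ▸ List.mem_map_of_mem h') hk
        simp [List.contains_cons, hvv ▸ hne]
    · have hqk : ¬ q = kv.1 := fun e => hq e.symm
      have hlk : List.lookup q ((kv.1, kv.2) :: r) = List.lookup q r := by
        simp [List.lookup, beq_eq_false_iff_ne.mpr hqk]
      have hcont : ((kv :: r).map Prod.fst).contains q = (r.map Prod.fst).contains q := by
        simp [List.contains_cons, beq_eq_false_iff_ne.mpr hqk]
      constructor
      · intro ha
        unfold pvAct1 at ha
        rw [hlk, hcont] at ha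
        obtain ⟨kv', h', hp⟩ := (ih hnd').mp ha
        exact ⟨kv', List.mem_cons_of_mem _ h', hp⟩
      · rintro ⟨kv', hkv', hne, hq'⟩
        unfold pvAct1
        rw [hlk, hcont]
        rcases List.mem_cons.mp hkv' with h' | h'
        · exact absurd (h' ▸ hq') hq
        · exact (ih hnd').mpr ⟨kv', h', hne, hq'⟩

-- membership in B's inverted index, one rating at a time
theorem pv_seen1 (r : List (String × Int)) (d : PySem.Dict String (PySem.Set Int))
    (p : String) (x : Int) :
    x ∈ (r.foldl (fun d kv => d.modify kv.1 [] (fun s => PySem.Set.add s kv.2)) d).getD p []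
      ↔ x ∈ d.getD p [] ∨ (p, x) ∈ r := by
  induction r generalizing d with
  | nil => simp
  | cons kv r ih =>
    rw [List.foldl_cons, ih]
    rw [PySem.Dict.getD_modify]
    by_cases hp : p = kv.1
    · subst hp
      rw [if_pos rfl, PySem.Set.mem_add]
      constructor
      · rintro ((hs | hx) | hr)
        · exact Or.inl hs
        · exact Or.inr (by rw [hx, Prod.mk.eta]; exact List.mem_cons_self)
        · exact Or.inr (List.mem_cons_of_mem _ hr)
      · rintro (hs | hm)
        · exact Or.inl (Or.inl hs)
        · rcases List.mem_cons.mp hm with h' | h'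
          · exact Or.inl (Or.inr (congrArg Prod.snd h'))
          · exact Or.inr h'
    · rw [if_neg hp]
      constructor
      · rintro (hs | hr)
        · exact Or.inl hs
        · exact Or.inr (List.mem_cons_of_mem _ hr)
      · rintro (hs | hm)
        · exact Or.inl hs
        · rcases List.mem_cons.mp hm with h' | h'
          · exact absurd (congrArg Prod.fst h') hp
          · exact Or.inr h'

theorem pv_seen (h : List (List (String × Int))) (d : PySem.Dict String (PySem.Set Int))
    (p : String) (x : Int) :
    x ∈ (h.foldl (fun d rating => rating.foldl
          (fun d kv => d.modify kv.1 [] (fun s => PySem.Set.add s kv.2)) d) d).getD p []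
      ↔ x ∈ d.getD p [] ∨ ∃ r ∈ h, (p, x) ∈ r := by
  induction h generalizing d with
  | nil => simp
  | cons r h ih =>
    rw [List.foldl_cons, ih, pv_seen1]
    constructor
    · rintro ((hs | hr) | ⟨r', hr', hm⟩)
      · exact Or.inl hs
      · exact Or.inr ⟨r, List.mem_cons_self, hr⟩
      · exact Or.inr ⟨r', List.mem_cons_of_mem _ hr', hm⟩
    · rintro (hs | ⟨r', hr', hm⟩)
      · exact Or.inl (Or.inl hs)
      · rcases List.mem_cons.mp hr' with h' | h'
        · exact Or.inl (Or.inr (h' ▸ hm))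
        · exact Or.inr ⟨r', h', hm⟩

-- ===== VERDICT (by name: the statement is the Claim_ definition above) =====
theorem remove_passive_players_py_spec : Claim_equal_remove_passive_players_py := by
  intro h hdom hpre
  obtain ⟨hne, hnd, -⟩ := hpre
  obtain ⟨last, hlast⟩ : ∃ l, h.getLast? = some l := by
    cases hL : h.getLast? with
    | none => exact absurd (List.getLast?_eq_none_iff.mp hL) hne
    | some l => exact ⟨l, rfl⟩
  have hlastmem : last ∈ h := List.mem_of_getLast? hlast
  have hndL : (last.map Prod.fst).Nodup := hnd last hlastmem
  unfold Spec_remove_passive_players_py remove_passive_players_py remove_passive_players_py_alt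
  simp only [PySem.List.pyGet?_neg_one, hlast, Option.getD_some]
  rw [pv_outer_fold h _ hndL]
  apply List.map_congr_left
  intro rating hr
  rw [pv_del_fold]
  apply List.filter_congr
  intro kv _
  congr 1
  apply Bool.coe_iff_coe.mp
  simp only [List.contains_iff_mem]
  rw [List.mem_filter, PySem.Set.contains_iff, PySem.Set.mem_ofList, List.mem_filter]
  -- the two passivity tests agree for keys of the last dict
  have hmemseen : ∀ x : Int,
      x ∈ (h.foldl (fun d rating => rating.foldl
            (fun d kv => d.modify kv.1 [] (fun s => PySem.Set.add s kv.2)) d)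
            PySem.Dict.empty).getD kv.1 []
        ↔ ∃ r ∈ h, (kv.1, x) ∈ r := by
    intro x
    rw [pv_seen, PySem.Dict.getD_empty]
    simp
  constructor
  · rintro ⟨hmem, hno⟩
    refine ⟨hmem, ?_⟩
    rw [PySem.Set.equal_iff]
    intro x
    rw [hmemseen, PySem.Set.mem_ofList]
    constructor
    · rintro ⟨r', hr', hm⟩
      by_contra hx
      have hx1500 : x ≠ (1500 : Int) := by simpa using hx
      have : pvAct1 r' kv.1 = true :=
        (pv_act1_iff r' (hnd r' hr') kv.1).mpr ⟨(kv.1, x), hm, hx1500, rfl⟩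
      have hany : h.any (fun r => pvAct1 r kv.1) = true := List.any_eq_true.mpr ⟨r', hr', this⟩
      rw [hany] at hno
      simp at hno
    · intro hx
      obtain ⟨v, hv⟩ : ∃ v, (kv.1, v) ∈ last := by
        obtain ⟨kv', hkv', he⟩ := List.mem_map.mp hmem
        exact ⟨kv'.2, by rw [← he]; exact hkv'⟩
      have hv1500 : v = (1500 : Int) := by
        by_contra hvne
        have : pvAct1 last kv.1 = true :=
          (pv_act1_iff last hndL kv.1).mpr ⟨(kv.1, v), hv, hvne, rfl⟩
        have hany : h.any (fun r => pvAct1 r kv.1) = true :=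
          List.any_eq_true.mpr ⟨last, hlastmem, this⟩
        rw [hany] at hno
        simp at hno
      have hx1500 : x = (1500 : Int) := by simpa using hx
      exact ⟨last, hlastmem, by rw [hx1500, ← hv1500]; exact hv⟩
  · rintro ⟨hmem, heq⟩
    refine ⟨hmem, ?_⟩
    rw [PySem.Set.equal_iff] at heq
    cases hany : h.any (fun r => pvAct1 r kv.1) with
    | false => simp
    | true =>
      obtain ⟨r', hr', ha⟩ := List.any_eq_true.mp hany
      obtain ⟨kv', hkv', hne2, hq⟩ := (pv_act1_iff r' (hnd r' hr') kv.1).mp ha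
      have hx : kv'.2 ∈ PySem.Set.ofList [(1500 : Int)] := by
        rw [← heq kv'.2, hmemseen]
        exact ⟨r', hr', by rw [← hq]; exact hkv'⟩
      rw [PySem.Set.mem_ofList] at hx
      exact absurd (by simpa using hx) hne2
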